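-- pv_equiv track=rewrite | github.com/VectorCheck/vector-check-intel | modules/climate_ingest.py | _filter_to_month
-- ===== SOURCE A (Python) =====
-- def _filter_to_month(year_data: dict, month: int) -> dict:
--     filtered = {k: [] for k in year_data.keys()}
--     for i, ts in enumerate(year_data["timestamps"]):
--         try:
--             ts_month = int(ts[5:7]) if "-" in ts else int(ts[4:6])
--         except (ValueError, IndexError):
--             continue
--         if ts_month == month:
--             for k in year_data.keys():
--                 filtered[k].append(year_data[k][i])
--     return filtered
-- ===== SOURCE B (Python) =====
-- def _month_of(ts):
--     try:
--         return int(ts[5:7]) if "-" in ts else int(ts[4:6])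
--     except (ValueError, IndexError):
--         return None
--
--
-- def _filter_to_month(year_data: dict, month: int) -> dict:
--     keys = list(year_data.keys())
--     ti = keys.index("timestamps")
--     rows = list(zip(*(year_data[k] for k in keys)))
--     kept = [r for r in rows if _month_of(r[ti]) == month]
--     return {k: [r[j] for r in kept] for j, k in enumerate(keys)}
-- ===== Notes on version B (the rewrite author's own statement) =====
-- stated objective: alternative
-- what changed: A makes one row-major pass over the timestamps, appending year_data[k][i] to every column for each matching row; B transposes the columns into row tuples with zip(*columns), filters the row tuples by the month parsed from their timestamp field, and rebuilds each output column by projecting the kept rows.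
import Mathlib
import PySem

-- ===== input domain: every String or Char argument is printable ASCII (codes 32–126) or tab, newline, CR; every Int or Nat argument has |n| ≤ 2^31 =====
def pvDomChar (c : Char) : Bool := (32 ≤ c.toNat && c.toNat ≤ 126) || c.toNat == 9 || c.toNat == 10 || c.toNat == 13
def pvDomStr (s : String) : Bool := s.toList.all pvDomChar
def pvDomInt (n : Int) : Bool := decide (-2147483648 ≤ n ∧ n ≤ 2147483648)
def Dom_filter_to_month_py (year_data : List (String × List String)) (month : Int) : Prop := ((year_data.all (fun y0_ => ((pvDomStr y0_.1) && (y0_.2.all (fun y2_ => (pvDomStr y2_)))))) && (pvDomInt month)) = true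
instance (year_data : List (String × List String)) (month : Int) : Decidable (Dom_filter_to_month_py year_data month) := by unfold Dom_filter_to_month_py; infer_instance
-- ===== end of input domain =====

-- B replaces A's row-major append-across-columns pass by transpose (zip(*cols)) → filter row tuples
-- by month → rebuild columns from the kept rows; objective: alternative.


-- ===== PORT A =====
-- shared parse (identical expression in both Pythons): int(ts[5:7]) if "-" in ts else int(ts[4:6]);
-- none = ValueError (A: continue; B's _month_of: return None)
def pvMonth? (ts : String) : Option Int :=
  if PySem.Str.isIn "-" ts then PySem.Int.ofStr? (PySem.Str.slice ts (some 5) (some 7))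
  else PySem.Int.ofStr? (PySem.Str.slice ts (some 4) (some 6))

-- inner loop body of A: filtered[k].append(year_data[k][i]); none = IndexError, excluded by Pre_
def pvAppendRow (d : PySem.Dict String (List String)) (i : Int)
    (f : PySem.Dict String (List String)) (k : String) : PySem.Dict String (List String) :=
  match PySem.List.pyGet? (d.getD k []) i with
  | some v => f.modify k [] (fun l => l ++ [v])
  | none => f

-- outer loop body of A over enumerate(year_data["timestamps"])
def pvStepA (d : PySem.Dict String (List String)) (month : Int)
    (f : PySem.Dict String (List String)) (q : Int × String) : PySem.Dict String (List String) :=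
  match pvMonth? q.2 with
  | none => f
  | some m => if m = month then d.keys.foldl (pvAppendRow d q.1) f else f

def filter_to_month_py (year_data : List (String × List String)) (month : Int) : List (String × List String) :=
  let d := PySem.Dict.ofList year_data
  let filtered := d.keys.foldl (fun f k => f.insert k ([] : List String)) PySem.Dict.empty
  match d.get? "timestamps" with
  | none => filtered.items   -- KeyError in Python; excluded by Pre_
  | some tss => ((PySem.List.enumerate tss).foldl (pvStepA d month) filtered).items

-- ===== PORT B =====
-- rows = list(zip(*(year_data[k] for k in keys))): ported by hand, exact to Python zip's
-- truncate-at-shortest semantics (stop as soon as any iterable is exhausted); a row tuple is a List String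
def pvRows (cols : List (List String)) : List (List String) :=
  if h : cols ≠ [] ∧ ∀ c ∈ cols, c ≠ [] then
    cols.map (fun c => c.headD "") :: pvRows (cols.map List.tail)
  else []
termination_by (cols.headD []).length
decreasing_by
  rcases cols with _ | ⟨c, cs⟩
  · exact absurd rfl h.1
  · have hc : c ≠ [] := h.2 c (List.mem_cons_self ..)
    have : 0 < c.length := List.length_pos_iff.mpr hc
    simp [List.length_tail]
    omega

-- _month_of(r[ti]) for a row tuple r; r[ti] is always in range (excluded-by-Pre_ cases aside)
def pvRowMonth (ti : Nat) (r : List String) : Option Int :=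
  pvMonth? ((PySem.List.pyGet? r (ti : Int)).getD "")

def filter_to_month_py_alt (year_data : List (String × List String)) (month : Int) : List (String × List String) :=
  let d := PySem.Dict.ofList year_data
  let keys := d.keys
  match PySem.List.index? keys "timestamps" with
  | none => []   -- ValueError from keys.index in Python; excluded by Pre_
  | some ti =>
    let rows := pvRows (keys.map (fun k => d.getD k []))  -- year_data[k] never raises: k ∈ keys
    let kept := rows.filter (fun r => pvRowMonth ti r == some month)
    ((PySem.List.enumerate keys).foldl (fun out q =>
        out.insert q.2 (kept.map (fun r => (PySem.List.pyGet? r q.1).getD ""))) PySem.Dict.empty).items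

-- ===== PRECONDITION & SPEC =====
-- Pre_ excludes exactly the inputs where A raises: a missing "timestamps" key (KeyError), and a
-- month-matching row index that reaches past the end of some column (IndexError).
def Pre_filter_to_month_py (year_data : List (String × List String)) (month : Int) : Prop :=
  (PySem.Dict.ofList year_data).contains "timestamps" = true ∧
  ∀ q ∈ PySem.List.enumerate (((PySem.Dict.ofList year_data).get? "timestamps").getD []),
    pvMonth? q.2 = some month →
    ∀ p ∈ (PySem.Dict.ofList year_data).items, q.1 < (p.2.length : Int)

instance (year_data : List (String × List String)) (month : Int) : Decidable (Pre_filter_to_month_py year_data month) := by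
  unfold Pre_filter_to_month_py; infer_instance

def pvWitness_filter_to_month_py : (List (String × List String)) × Int :=
  ([("timestamps", ["2020-05-01", "2020-06-02", "2020-05-03"]), ("temp", ["1", "2", "3"])], 5)

def Spec_filter_to_month_py (year_data : List (String × List String)) (month : Int) (out : List (String × List String)) : Prop := out = filter_to_month_py_alt year_data month
instance (year_data : List (String × List String)) (month : Int) (out : List (String × List String)) : Decidable (Spec_filter_to_month_py year_data month out) := by unfold Spec_filter_to_month_py; infer_instance

-- ===== CLAIM (what is proved, stated in full; the proofs are below) =====
def Claim_equal_filter_to_month_py : Prop := ∀ (year_data : List (String × List String)) (month : Int), Dom_filter_to_month_py year_data month → Pre_filter_to_month_py year_data month → Spec_filter_to_month_py year_data month (filter_to_month_py year_data month)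

-- ===== LEMMAS AND PROOFS =====

-- [A's value per column, proof-side] gather at a list of row indices
def pvGather (idx : List Int) (col : List String) : List String :=
  idx.map (fun i => (PySem.List.pyGet? col i).getD "")

theorem pv_enumerate_ge (tss : List String) : ∀ (s : Int), ∀ q ∈ PySem.List.enumerate tss s, s ≤ q.1 := by
  induction tss with
  | nil => intro s q hq; simp [PySem.List.enumerate_nil] at hq
  | cons t ts ih =>
    intro s q hq
    rw [PySem.List.enumerate_cons] at hq
    rcases List.mem_cons.mp hq with h | h
    · simp [h]
    · have := ih (s + 1) q h; omega

theorem pv_inner_untouched (d : PySem.Dict String (List String)) (i : Int)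
    (ks : List String) : ∀ (f : PySem.Dict String (List String)) (k0 : String), k0 ∉ ks →
    (ks.foldl (pvAppendRow d i) f).getD k0 [] = f.getD k0 [] := by
  induction ks with
  | nil => intro f k0 _; rfl
  | cons k ks ih =>
    intro f k0 h
    have hne : k0 ≠ k := fun e => h (e ▸ List.mem_cons_self ..)
    have h2 : k0 ∉ ks := fun e => h (List.mem_cons_of_mem _ e)
    rw [List.foldl_cons, ih _ _ h2]
    unfold pvAppendRow
    rcases PySem.List.pyGet? (d.getD k []) i with _ | v
    · rfl
    · exact PySem.Dict.getD_modify_of_ne f [] _ hne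

theorem pv_inner_getD (d : PySem.Dict String (List String)) (i : Int)
    (ks : List String) (hnd : ks.Nodup) (f : PySem.Dict String (List String))
    (k0 : String) (hk0 : k0 ∈ ks) (v : String) (hv : PySem.List.pyGet? (d.getD k0 []) i = some v) :
    (ks.foldl (pvAppendRow d i) f).getD k0 [] = f.getD k0 [] ++ [v] := by
  induction ks generalizing f with
  | nil => simp at hk0
  | cons k ks ih =>
    rcases List.mem_cons.mp hk0 with h | h
    · subst h
      have hnotin : k0 ∉ ks := (List.nodup_cons.mp hnd).1
      rw [List.foldl_cons, pv_inner_untouched d i ks _ k0 hnotin]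
      unfold pvAppendRow
      rw [hv]
      exact PySem.Dict.getD_modify_self f k0 [] _
    · have hne : k0 ≠ k := fun e => (List.nodup_cons.mp hnd).1 (e ▸ h)
      rw [List.foldl_cons, ih (List.nodup_cons.mp hnd).2 _ h]
      congr 1
      unfold pvAppendRow
      rcases PySem.List.pyGet? (d.getD k []) i with _ | w
      · rfl
      · exact PySem.Dict.getD_modify_of_ne f [] _ hne

theorem pv_inner_keys (d : PySem.Dict String (List String)) (i : Int)
    (ks : List String) : ∀ (f : PySem.Dict String (List String)), (∀ k ∈ ks, k ∈ f.keys) →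
    (ks.foldl (pvAppendRow d i) f).keys = f.keys := by
  induction ks with
  | nil => intro f _; rfl
  | cons k ks ih =>
    intro f h
    rw [List.foldl_cons]
    have hstep : (pvAppendRow d i f k).keys = f.keys := by
      unfold pvAppendRow
      rcases PySem.List.pyGet? (d.getD k []) i with _ | v
      · rfl
      · rw [PySem.Dict.keys_modify, PySem.Dict.keys_insert_of_contains]
        exact (PySem.Dict.contains_iff_mem_keys ..).mpr (h k (List.mem_cons_self ..))
    rw [ih _ (fun k' hk' => hstep ▸ h k' (List.mem_cons_of_mem _ hk')), hstep]

theorem pv_inner_items (d : PySem.Dict String (List String)) (hnd : d.keys.Nodup) (i : Int)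
    (f : PySem.Dict String (List String)) (G : String → List String)
    (hkeys : f.keys = d.keys)
    (hf : f.items = d.keys.map (fun k => (k, G k)))
    (hlen : ∀ k ∈ d.keys, (PySem.List.pyGet? (d.getD k []) i).isSome = true) :
    (d.keys.foldl (pvAppendRow d i) f).items
      = d.keys.map (fun k => (k, G k ++ [(PySem.List.pyGet? (d.getD k []) i).getD ""])) := by
  have hFkeys : (d.keys.foldl (pvAppendRow d i) f).keys = d.keys := by
    rw [pv_inner_keys d i d.keys f (fun k hk => hkeys ▸ hk), hkeys]
  have hFitems := PySem.Dict.items_eq_map_keys (d.keys.foldl (pvAppendRow d i) f) (by rw [hFkeys]; exact hnd) []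
  rw [hFitems, hFkeys]
  apply List.map_congr_left
  intro k hk
  obtain ⟨v, hv⟩ := Option.isSome_iff_exists.mp (hlen k hk)
  have hfk : f.getD k [] = G k := by
    apply PySem.Dict.getD_of_mem_items f _ (hkeys ▸ hnd)
    rw [hf]
    exact List.mem_map_of_mem hk
  rw [pv_inner_getD d i d.keys hnd f k hk v hv, hfk, hv]
  rfl

theorem pv_main (d : PySem.Dict String (List String)) (hnd : d.keys.Nodup) (month : Int) :
    ∀ (tss : List String) (s : Int) (js : List Int) (f : PySem.Dict String (List String)),
    f.keys = d.keys →
    f.items = d.keys.map (fun k => (k, pvGather js (d.getD k []))) →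
    (∀ q ∈ PySem.List.enumerate tss s, pvMonth? q.2 = some month →
        ∀ k ∈ d.keys, (PySem.List.pyGet? (d.getD k []) q.1).isSome = true) →
    ((PySem.List.enumerate tss s).foldl (pvStepA d month) f).items
      = d.keys.map (fun k => (k,
          pvGather (js ++ ((PySem.List.enumerate tss s).filter
            (fun q => pvMonth? q.2 == some month)).map (·.1)) (d.getD k []))) := by
  intro tss
  induction tss with
  | nil =>
    intro s js f hkeys hitems _
    simpa [PySem.List.enumerate_nil] using hitems
  | cons t ts ih =>
    intro s js f hkeys hitems hq
    rw [PySem.List.enumerate_cons] at *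
    rw [List.foldl_cons]
    rcases hm : pvMonth? t with _ | m
    · have hstep : pvStepA d month f (s, t) = f := by unfold pvStepA; rw [hm]
      rw [hstep, List.filter_cons_of_neg (by simp [hm]),
        ih (s+1) js f hkeys hitems (fun q hq' => hq q (List.mem_cons_of_mem _ hq'))]
    · by_cases hmm : m = month
      · have hsome : ∀ k ∈ d.keys, (PySem.List.pyGet? (d.getD k []) s).isSome = true :=
          hq (s, t) (List.mem_cons_self ..) (by rw [hm, hmm])
        have hstep : pvStepA d month f (s, t) = d.keys.foldl (pvAppendRow d s) f := by
          unfold pvStepA; rw [hm]; simp [hmm]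
        have h1 := pv_inner_items d hnd s f (fun k => pvGather js (d.getD k [])) hkeys hitems hsome
        have h1' : (d.keys.foldl (pvAppendRow d s) f).items
            = d.keys.map (fun k => (k, pvGather (js ++ [s]) (d.getD k []))) := by
          rw [h1]; apply List.map_congr_left; intro k _
          simp [pvGather]
        have hk1 : (d.keys.foldl (pvAppendRow d s) f).keys = d.keys := by
          rw [pv_inner_keys d s d.keys f (fun k hk => hkeys ▸ hk), hkeys]
        rw [hstep, ih (s+1) (js ++ [s]) _ hk1 h1'
          (fun q hq' => hq q (List.mem_cons_of_mem _ hq')),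
          List.filter_cons_of_pos (by simp [hm, hmm])]
        simp
      · have hstep : pvStepA d month f (s, t) = f := by
          unfold pvStepA; rw [hm]; simp [hmm]
        rw [hstep, List.filter_cons_of_neg (by simp [hm, hmm]),
          ih (s+1) js f hkeys hitems (fun q hq' => hq q (List.mem_cons_of_mem _ hq'))]

-- ---- B-side: characterisation of pvRows (zip(*cols)) ----

theorem pv_tail_getD (c : List String) (hc : c ≠ []) (i : Nat) :
    c.tail.getD i "" = c.getD (i + 1) "" := by
  rcases c with _ | ⟨x, xs⟩
  · exact absurd rfl hc
  · rfl

theorem pvRows_getElem?_pos_fuel : ∀ (m : Nat) (cols : List (List String)),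
    (cols.headD []).length ≤ m → ∀ (i : Nat), cols ≠ [] →
    (∀ c ∈ cols, i < c.length) →
    (pvRows cols)[i]? = some (cols.map (fun c => c.getD i "")) := by
  intro m
  induction m with
  | zero =>
    intro cols hm i hne hlt
    exfalso
    rcases cols with _ | ⟨c, cs⟩
    · exact hne rfl
    · have h1 := hlt c (List.mem_cons_self ..)
      simp only [List.headD_cons] at hm
      omega
  | succ m ih =>
    intro cols hm i hne hlt
    have hcond : cols ≠ [] ∧ ∀ c ∈ cols, c ≠ [] := by
      refine ⟨hne, fun c hc => ?_⟩
      have := hlt c hc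
      intro e; rw [e] at this; simp at this
    rw [pvRows, dif_pos hcond]
    cases i with
    | zero =>
      simp only [List.getElem?_cons_zero, Option.some.injEq]
      apply List.map_congr_left
      intro c hc
      rcases c with _ | ⟨x, xs⟩
      · exact absurd rfl (hcond.2 _ hc)
      · rfl
    | succ i =>
      rw [List.getElem?_cons_succ, ih (cols.map List.tail)
        (by rcases cols with _ | ⟨c, cs⟩
            · exact absurd rfl hne
            · simp only [List.map_cons, List.headD_cons] at *
              simp [List.length_tail]; omega)
        i (by simpa using hne)
        (by intro t ht
            obtain ⟨c, hc, rfl⟩ := List.mem_map.mp ht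
            have := hlt c hc
            simp [List.length_tail]; omega)]
      rw [List.map_map]
      congr 1
      apply List.map_congr_left
      intro c hc
      exact pv_tail_getD c (hcond.2 c hc) i

theorem pvRows_getElem?_pos (cols : List (List String)) (i : Nat) (hne : cols ≠ [])
    (hlt : ∀ c ∈ cols, i < c.length) :
    (pvRows cols)[i]? = some (cols.map (fun c => c.getD i "")) :=
  pvRows_getElem?_pos_fuel (cols.headD []).length cols le_rfl i hne hlt

theorem pvRows_getElem?_neg_fuel : ∀ (m : Nat) (cols : List (List String)),
    (cols.headD []).length ≤ m → ∀ (i : Nat),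
    (cols = [] ∨ ∃ c ∈ cols, c.length ≤ i) → (pvRows cols)[i]? = none := by
  intro m
  induction m with
  | zero =>
    intro cols hm i hbad
    by_cases hcond : cols ≠ [] ∧ ∀ c ∈ cols, c ≠ []
    · exfalso
      rcases cols with _ | ⟨c, cs⟩
      · exact hcond.1 rfl
      · have hc := hcond.2 c (List.mem_cons_self ..)
        simp only [List.headD_cons, Nat.le_zero, List.length_eq_zero_iff] at hm
        exact hc hm
    · rw [pvRows, dif_neg hcond]; rfl
  | succ m ih =>
    intro cols hm i hbad
    by_cases hcond : cols ≠ [] ∧ ∀ c ∈ cols, c ≠ []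
    · rcases hbad with rfl | ⟨c, hc, hcl⟩
      · exact absurd rfl hcond.1
      · have hpos : 0 < c.length := List.length_pos_iff.mpr (hcond.2 c hc)
        cases i with
        | zero => omega
        | succ i =>
          rw [pvRows, dif_pos hcond, List.getElem?_cons_succ]
          apply ih (cols.map List.tail)
            (by rcases cols with _ | ⟨c0, cs⟩
                · exact absurd rfl hcond.1
                · simp only [List.map_cons, List.headD_cons] at *
                  simp [List.length_tail]; omega)
          right
          refine ⟨c.tail, List.mem_map_of_mem hc, ?_⟩
          simp [List.length_tail]; omega
    · rw [pvRows, dif_neg hcond]; rfl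

theorem pvRows_getElem?_neg (cols : List (List String)) (i : Nat)
    (hbad : cols = [] ∨ ∃ c ∈ cols, c.length ≤ i) : (pvRows cols)[i]? = none :=
  pvRows_getElem?_neg_fuel (cols.headD []).length cols le_rfl i hbad

theorem pvRows_lt_iff (cols : List (List String)) (i : Nat) :
    i < (pvRows cols).length ↔ (cols ≠ [] ∧ ∀ c ∈ cols, i < c.length) := by
  constructor
  · intro hi
    by_cases hne : cols = []
    · subst hne
      rw [pvRows] at hi
      simp at hi
    · refine ⟨hne, fun c hc => ?_⟩
      by_contra hlt
      push Not at hlt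
      have hnone := pvRows_getElem?_neg cols i (Or.inr ⟨c, hc, hlt⟩)
      rw [List.getElem?_eq_getElem hi] at hnone
      simp at hnone
  · intro ⟨h1, h2⟩
    have h := pvRows_getElem?_pos cols i h1 h2
    have h' : (pvRows cols)[i]?.isSome = true := by rw [h]; rfl
    simpa using h'

theorem pvRows_eq_range (cols : List (List String)) :
    pvRows cols = (List.range (pvRows cols).length).map
      (fun i => cols.map (fun c => c.getD i "")) := by
  apply List.ext_getElem (by simp)
  intro i h1 h2
  have hcond := (pvRows_lt_iff cols i).mp h1
  have h3 := pvRows_getElem?_pos cols i hcond.1 hcond.2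
  rw [List.getElem?_eq_getElem h1] at h3
  simp only [List.getElem_map, List.getElem_range]
  exact Option.some_injective _ h3

-- enumerate as a map over range
theorem pv_enumerate_eq_range (tss : List String) :
    PySem.List.enumerate tss 0
      = (List.range tss.length).map (fun i : Nat => ((i : Int), tss.getD i "")) := by
  apply List.ext_getElem (by simp [PySem.List.length_enumerate])
  intro i h1 h2
  rw [PySem.List.getElem_enumerate]
  simp only [List.getElem_map, List.getElem_range]
  rw [List.getD_eq_getElem?_getD, List.getElem?_eq_getElem (by simpa [PySem.List.length_enumerate] using h1)]
  simp

-- the matching indices: filtering all of range tss.length equals filtering only range n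
theorem pv_filter_range_eq (tss : List String) (month : Int) (n : Nat)
    (hle : n ≤ tss.length)
    (hbound : ∀ i : Nat, i < tss.length → (pvMonth? (tss.getD i "") == some month) = true → i < n) :
    (List.range tss.length).filter (fun i => pvMonth? (tss.getD i "") == some month)
      = (List.range n).filter (fun i => pvMonth? (tss.getD i "") == some month) := by
  have hsplit : tss.length = n + (tss.length - n) := by omega
  rw [hsplit, List.range_add, List.filter_append]
  have : ((List.range (tss.length - n)).map (n + ·)).filter
      (fun i => pvMonth? (tss.getD i "") == some month) = [] := by
    rw [List.filter_eq_nil_iff]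
    intro a ha hpa
    obtain ⟨j, hj, rfl⟩ := List.mem_map.mp ha
    rw [List.mem_range] at hj
    have := hbound (n + j) (by omega) hpa
    omega
  rw [this, List.append_nil]

-- ===== VERDICT (by name: the statement is the Claim_ definition above) =====
theorem filter_to_month_py_spec : Claim_equal_filter_to_month_py := by
  intro yd month _ hpre
  obtain ⟨hc, hlen⟩ := hpre
  unfold Spec_filter_to_month_py filter_to_month_py filter_to_month_py_alt
  obtain ⟨tss, hts⟩ : ∃ tss, (PySem.Dict.ofList yd).get? "timestamps" = some tss := by
    rw [PySem.Dict.contains_eq_isSome_get?] at hc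
    exact Option.isSome_iff_exists.mp hc
  rw [hts] at hlen
  have hnd := PySem.Dict.nodup_keys_ofList yd
  have htsmem : "timestamps" ∈ (PySem.Dict.ofList yd).keys :=
    (PySem.Dict.contains_iff_mem_keys ..).mp (by rw [PySem.Dict.contains_eq_isSome_get?, hts]; rfl)
  obtain ⟨ti, hti⟩ := Option.isSome_iff_exists.mp
    ((PySem.List.index?_isSome_iff ..).mpr htsmem)
  obtain ⟨hlt_ti, hkti, -⟩ := PySem.List.getElem_of_index?_eq_some hti
  -- abbreviations
  have hq : ∀ q ∈ PySem.List.enumerate tss 0, pvMonth? q.2 = some month →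
      ∀ k ∈ (PySem.Dict.ofList yd).keys,
        (PySem.List.pyGet? ((PySem.Dict.ofList yd).getD k []) q.1).isSome = true := by
    intro q hmem hmonth k hk
    obtain ⟨p, hp, hpk⟩ := List.mem_map.mp hk
    have hgd : (PySem.Dict.ofList yd).getD k [] = p.2 := by
      apply PySem.Dict.getD_of_mem_items _ _ hnd
      rw [← hpk]
      simpa using hp
    have hltq := hlen q hmem hmonth p hp
    have hge : (0 : Int) ≤ q.1 := pv_enumerate_ge tss 0 q hmem
    have : PySem.List.pyGet? p.2 q.1 = p.2[q.1.toNat]? := by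
      rw [← PySem.List.pyGet?_natCast p.2 q.1.toNat, Int.toNat_of_nonneg hge]
    rw [hgd, this, List.getElem?_eq_getElem (by omega)]
    rfl
  -- the initial dict {k: [] for k}
  have hitems0 : (((PySem.Dict.ofList yd).keys).foldl
      (fun f k => f.insert k ([] : List String)) PySem.Dict.empty).items
      = (PySem.Dict.ofList yd).keys.map (fun k => (k, pvGather [] ((PySem.Dict.ofList yd).getD k []))) := by
    rw [PySem.Dict.items_foldl_insert_fresh _ (fun k => k) (fun _ => ([] : List String)) _
      (by intro a _; exact PySem.Dict.contains_empty a) (by rw [List.map_id_fun']; exact hnd)]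
    simp [pvGather, PySem.Dict.empty]
  have hkeys0 : (((PySem.Dict.ofList yd).keys).foldl
      (fun f k => f.insert k ([] : List String)) PySem.Dict.empty).keys
      = (PySem.Dict.ofList yd).keys := by
    show (_ : PySem.Dict String (List String)).items.map Prod.fst = _
    rw [hitems0, List.map_map]
    exact List.map_id _
  -- A's side via the main-loop invariant
  simp only [hts, hti]
  rw [pv_main (PySem.Dict.ofList yd) hnd month tss 0 [] _ hkeys0 hitems0 hq]
  -- B's side: items of the rebuild loop
  rw [PySem.Dict.items_foldl_insert_fresh (PySem.List.enumerate (PySem.Dict.ofList yd).keys)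
      (fun q => q.2)
      (fun q => ((pvRows ((PySem.Dict.ofList yd).keys.map
          (fun k => (PySem.Dict.ofList yd).getD k []))).filter
            (fun r => pvRowMonth ti r == some month)).map
          (fun r => (PySem.List.pyGet? r q.1).getD "")) PySem.Dict.empty
      (by intro a _; exact PySem.Dict.contains_empty _)
      (by rw [PySem.List.map_snd_enumerate]; exact hnd)]
  simp only [PySem.Dict.empty, List.nil_append]
  -- common abbreviations (as plain haves)
  generalize hKS : (PySem.Dict.ofList yd).keys = ks at *
  generalize hCOLS : ks.map (fun k => (PySem.Dict.ofList yd).getD k []) = cols at *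
  have hcols_len : cols.length = ks.length := by rw [← hCOLS]; simp
  have hcolti? : cols[ti]? = some tss := by
    rw [← hCOLS, List.getElem?_map, List.getElem?_eq_getElem hlt_ti, hkti]
    simp [PySem.Dict.getD_eq_get?_getD, hts]
  have htss_mem : tss ∈ cols := List.mem_of_getElem? hcolti?
  have hcols_ne : cols ≠ [] := by
    intro e
    rw [e] at hcols_len
    simp at hcols_len
    omega
  have hmatch : ∀ i : Nat, i < tss.length → pvMonth? (tss.getD i "") = some month →
      ∀ c ∈ cols, i < c.length := by
    intro i hi hmon c hcmem
    rw [← hCOLS] at hcmem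
    obtain ⟨k, hk, rfl⟩ := List.mem_map.mp hcmem
    obtain ⟨p, hp, hpk⟩ := List.mem_map.mp (hKS ▸ hk)
    have hgd : (PySem.Dict.ofList yd).getD k [] = p.2 := by
      apply PySem.Dict.getD_of_mem_items _ _ (by rw [hKS]; exact hnd)
      rw [← hpk]
      simpa using hp
    have hqmem : (((i : Nat) : Int), tss.getD i "") ∈ PySem.List.enumerate tss 0 := by
      rw [PySem.List.mem_enumerate_iff]
      refine ⟨i, hi, ?_⟩
      rw [List.getD_eq_getElem?_getD, List.getElem?_eq_getElem hi]
      simp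
    have h2 : ((i : Nat) : Int) < (p.2.length : Int) := hlen _ hqmem hmon p hp
    rw [hgd]
    exact_mod_cast h2
  have hbound : ∀ i : Nat, i < tss.length →
      (pvMonth? (tss.getD i "") == some month) = true → i < (pvRows cols).length := by
    intro i hi hb
    exact (pvRows_lt_iff cols i).mpr ⟨hcols_ne, hmatch i hi (by simpa using hb)⟩
  have hn_le_tss : (pvRows cols).length ≤ tss.length := by
    rcases Nat.eq_zero_or_pos (pvRows cols).length with h0 | h0
    · omega
    · have := ((pvRows_lt_iff cols ((pvRows cols).length - 1)).mp (by omega)).2 tss htss_mem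
      omega
  have hn_all : ∀ i : Nat, i < (pvRows cols).length → ∀ c ∈ cols, i < c.length :=
    fun i hi => ((pvRows_lt_iff cols i).mp hi).2
  -- the kept rows, as a gather over the matching indices of range n
  have hkept : (pvRows cols).filter (fun r => pvRowMonth ti r == some month)
      = (((List.range (pvRows cols).length).filter
          (fun i => pvMonth? (tss.getD i "") == some month)).map
          (fun i => cols.map (fun c => c.getD i ""))) := by
    conv_lhs => rw [pvRows_eq_range cols]
    rw [List.filter_map]
    congr 1
    apply List.filter_congr
    intro i _
    show (pvRowMonth ti (cols.map fun c => c.getD i "") == some month)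
        = (pvMonth? (tss.getD i "") == some month)
    unfold pvRowMonth
    rw [PySem.List.pyGet?_natCast]
    rw [List.getElem?_map, hcolti?]
    rfl
  -- the matching indices of A equal those of B (cast to Int)
  have hidxF : ((PySem.List.enumerate tss 0).filter
        (fun q => pvMonth? q.2 == some month)).map (·.1)
      = (((List.range (pvRows cols).length).filter
          (fun i => pvMonth? (tss.getD i "") == some month)).map (fun i : Nat => (i : Int))) := by
    rw [pv_enumerate_eq_range tss, List.filter_map, List.map_map]
    have e1 : ((fun q : Int × String => pvMonth? q.2 == some month) ∘
        (fun i : Nat => ((i : Int), tss.getD i "")))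
        = fun i : Nat => pvMonth? (tss.getD i "") == some month := by funext i; rfl
    have e2 : ((fun q : Int × String => q.1) ∘ (fun i : Nat => ((i : Int), tss.getD i "")))
        = fun i : Nat => (i : Int) := by funext i; rfl
    rw [e1, e2, pv_filter_range_eq tss month _ hn_le_tss hbound]
  -- columnwise equality
  apply List.ext_getElem?
  intro j
  by_cases hjks : j < ks.length
  · have hjc : j < cols.length := by omega
    rw [List.getElem?_map, List.getElem?_map, PySem.List.getElem?_enumerate,
      List.getElem?_eq_getElem hjks]
    simp only [Option.map_some]
    refine congrArg some (Prod.ext (by simp) ?_)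
    show pvGather (((PySem.List.enumerate tss).filter
        (fun q => pvMonth? q.2 == some month)).map (·.1)) ((PySem.Dict.ofList yd).getD ks[j] [])
      = ((pvRows cols).filter (fun r => pvRowMonth ti r == some month)).map
          (fun r => (PySem.List.pyGet? r ((0 : Int) + (j : Int))).getD "")
    have hcolj? : cols[j]? = some ((PySem.Dict.ofList yd).getD ks[j] []) := by
      rw [← hCOLS, List.getElem?_map, List.getElem?_eq_getElem hjks]
      rfl
    have hcolj : (PySem.Dict.ofList yd).getD ks[j] [] = cols[j]'hjc := by
      have h5 := List.getElem?_eq_getElem hjc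
      rw [hcolj?] at h5
      exact Option.some_inj.mp h5
    rw [hidxF, hcolj, hkept, List.map_map, pvGather, List.map_map]
    apply List.map_congr_left
    intro i hi
    have hin : i < (pvRows cols).length := List.mem_range.mp (List.mem_of_mem_filter hi)
    have hic : i < (cols[j]'hjc).length := hn_all i hin _ (List.getElem_mem hjc)
    show (PySem.List.pyGet? (cols[j]'hjc) ((i : Nat) : Int)).getD ""
      = (PySem.List.pyGet? (cols.map fun c => c.getD i "") ((0 : Int) + (j : Int))).getD ""
    rw [PySem.List.pyGet?_natCast, List.getElem?_eq_getElem hic]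
    have h0j : ((0 : Int) + (j : Int)) = ((j : Nat) : Int) := by omega
    rw [h0j, PySem.List.pyGet?_natCast, List.getElem?_map, List.getElem?_eq_getElem hjc]
    simp [List.getD_eq_getElem?_getD, List.getElem?_eq_getElem hic]
  · rw [List.getElem?_eq_none (by simpa using hjks),
      List.getElem?_eq_none (by simp [PySem.List.length_enumerate]; omega)]
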